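-- pv_equiv track=rewrite | github.com/woo-nny/project_python | KYC/algorithm/TEST/Wsquare.py | solution
-- ===== SOURCE A (Python) =====
-- def solution(W,H):
--     s = [W,H]
--     s.sort()
--     if W == H or s[0] == 1:
--         return W*H - s[1]
--     else:
--         for h in range(s[0],1,-1):
--             if s[0] % h == 0 and s[1] % h== 0:
--                 return W * H - ((s[1]//h + s[0] // h -1) * (h))
--     return W * H - (W + H -1)
-- ===== SOURCE B (Python) =====
-- def solution(W, H):
--     lo, hi = (W, H) if W <= H else (H, W)
--     if W == H or lo == 1:
--         return W * H - hi
--     if lo >= 2: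
--         a, b = lo, hi
--         while b:
--             a, b = b, a % b
--         return W * H - (hi // a + lo // a - 1) * a
--     return W * H - (W + H - 1)
-- ===== Notes on version B (the rewrite author's own statement) =====
-- stated objective: faster
-- what changed: Replaces A's downward trial-division scan over all candidate divisors with a Euclidean gcd loop (repeated modulo), using that the scan finds exactly the gcd and that the gcd-1 fallback is the same formula with g=1.
import Mathlib
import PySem

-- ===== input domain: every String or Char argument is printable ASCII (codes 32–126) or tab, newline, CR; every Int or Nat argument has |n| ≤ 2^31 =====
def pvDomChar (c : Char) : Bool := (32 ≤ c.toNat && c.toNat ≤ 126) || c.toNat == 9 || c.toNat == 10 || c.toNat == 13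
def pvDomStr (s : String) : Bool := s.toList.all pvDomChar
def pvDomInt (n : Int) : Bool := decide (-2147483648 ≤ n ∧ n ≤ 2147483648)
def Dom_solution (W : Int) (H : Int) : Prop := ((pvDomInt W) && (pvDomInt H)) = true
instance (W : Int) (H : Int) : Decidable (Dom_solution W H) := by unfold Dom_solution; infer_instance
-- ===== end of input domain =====

-- B replaces A's downward trial-division divisor scan with a Euclidean gcd loop (faster, asymptotic change).

-- ===== PORT A =====
-- the 'for h in range(s[0],1,-1)' loop with its early return, as structural recursion counting h down
def findDiv (lo hi : Int) (h : Int) : Option Int :=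
  if hlt : 2 ≤ h then
    if PySem.Int.mod lo h = 0 ∧ PySem.Int.mod hi h = 0 then some h
    else findDiv lo hi (h - 1)
  else none
termination_by h.toNat
decreasing_by omega

def solution (W : Int) (H : Int) : Int :=
  -- s = [W,H]; s.sort()  (two-element sort)
  let s0 := if W ≤ H then W else H
  let s1 := if W ≤ H then H else W
  if W = H ∨ s0 = 1 then W * H - s1
  else
    match findDiv s0 s1 s0 with
    | some h => W * H - ((PySem.Int.floordiv s1 h + PySem.Int.floordiv s0 h - 1) * h)
    | none => W * H - (W + H - 1)

-- ===== PORT B =====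
-- the 'while b: a, b = b, a % b' loop
def euclid (a b : Int) : Int :=
  if _hb : b = 0 then a else euclid b (PySem.Int.mod a b)
termination_by b.natAbs
decreasing_by
  rcases lt_or_gt_of_ne _hb with hneg | hpos
  · have h1 := (PySem.Int.mod_neg_bounds hneg (a:=a)).1
    have h2 := (PySem.Int.mod_neg_bounds hneg (a:=a)).2
    omega
  · have h1 := PySem.Int.mod_nonneg hpos (a:=a)
    have h2 := PySem.Int.mod_lt hpos (a:=a)
    omega

def solution_alt (W : Int) (H : Int) : Int :=
  let lo := if W ≤ H then W else H
  let hi := if W ≤ H then H else W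
  if W = H ∨ lo = 1 then W * H - hi
  else if 2 ≤ lo then
    let g := euclid lo hi
    W * H - (PySem.Int.floordiv hi g + PySem.Int.floordiv lo g - 1) * g
  else W * H - (W + H - 1)

-- ===== PRECONDITION & SPEC =====
def Spec_solution (W : Int) (H : Int) (out : Int) : Prop := out = solution_alt W H
instance (W : Int) (H : Int) (out : Int) : Decidable (Spec_solution W H out) := by unfold Spec_solution; infer_instance

-- ===== CLAIM (what is proved, stated in full; the proofs are below) =====
def Claim_equal_solution : Prop := ∀ (W : Int) (H : Int), Dom_solution W H → Spec_solution W H (solution W H)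

-- ===== LEMMAS AND PROOFS =====

-- Euclid's loop computes the gcd (nonnegative inputs).
theorem euclid_eq_gcd : ∀ (n : Nat) (a b : Int), b.natAbs ≤ n → 0 ≤ a → 0 ≤ b →
    euclid a b = (Int.gcd a b : Int) := by
  intro n
  induction n with
  | zero =>
    intro a b hn ha hb
    have hb0 : b = 0 := by omega
    subst hb0
    rw [euclid]
    simp [Int.natAbs_of_nonneg ha]
  | succ n ih =>
    intro a b hn ha hb
    rw [euclid]
    split_ifs with h0
    · subst h0; simp [Int.natAbs_of_nonneg ha]
    · have hpos : 0 < b := by omega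
      have hmod : PySem.Int.mod a b = a % b := PySem.Int.mod_eq_emod_of_pos hpos
      have h1 : 0 ≤ a % b := Int.emod_nonneg a h0
      have h2 : a % b < b := Int.emod_lt_of_pos a hpos
      rw [hmod, ih b (a % b) (by omega) hb h1]
      rw [Int.gcd_comm, Int.gcd_emod]

-- The downward scan from h stops exactly at the gcd (or falls off the end when the gcd is 1).
theorem findDiv_eq (lo hi : Int) (hlo : 2 ≤ lo) (_hle : lo ≤ hi) :
    ∀ (n : Nat) (h : Int), h.toNat ≤ n → (Int.gcd lo hi : Int) ≤ h → h ≤ lo →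
      findDiv lo hi h = if 2 ≤ (Int.gcd lo hi : Int) then some (Int.gcd lo hi : Int) else none := by
  have hgpos : 0 < (Int.gcd lo hi : Int) := by
    have : lo ≠ 0 := by omega
    exact_mod_cast Int.gcd_pos_of_ne_zero_left hi this
  have hgdl : (Int.gcd lo hi : Int) ∣ lo := Int.gcd_dvd_left lo hi
  have hgdr : (Int.gcd lo hi : Int) ∣ hi := Int.gcd_dvd_right lo hi
  intro n
  induction n with
  | zero =>
    intro h hn hg hhl
    omega
  | succ n ih =>
    intro h hn hg hhl
    rw [findDiv]
    split_ifs with h2 hdvd hgle hgle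
    · -- h divides both: h ∣ gcd so h ≤ gcd, with gcd ≤ h gives h = gcd
      obtain ⟨d1, d2⟩ := hdvd
      have hd1 : h ∣ lo := (PySem.Int.mod_eq_zero_iff_dvd lo h).mp d1
      have hd2 : h ∣ hi := (PySem.Int.mod_eq_zero_iff_dvd hi h).mp d2
      have : h ∣ (Int.gcd lo hi : Int) := Int.dvd_coe_gcd hd1 hd2
      have hle' : h ≤ (Int.gcd lo hi : Int) := Int.le_of_dvd hgpos this
      have heq : h = (Int.gcd lo hi : Int) := by omega
      rw [heq]
    · -- h divides both but 2 ≤ gcd fails: impossible (as above h = gcd ≥ 2)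
      obtain ⟨d1, d2⟩ := hdvd
      have hd1 : h ∣ lo := (PySem.Int.mod_eq_zero_iff_dvd lo h).mp d1
      have hd2 : h ∣ hi := (PySem.Int.mod_eq_zero_iff_dvd hi h).mp d2
      have : h ∣ (Int.gcd lo hi : Int) := Int.dvd_coe_gcd hd1 hd2
      have hle' : h ≤ (Int.gcd lo hi : Int) := Int.le_of_dvd hgpos this
      exfalso; omega
    · -- h fails the test: gcd ≠ h, recurse at h-1
      have hne : (Int.gcd lo hi : Int) ≠ h := by
        intro heq
        exact hdvd ⟨by rw [← heq] at *; exact (PySem.Int.mod_eq_zero_iff_dvd lo _).mpr hgdl,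
                    by rw [← heq] at *; exact (PySem.Int.mod_eq_zero_iff_dvd hi _).mpr hgdr⟩
      rw [ih (h - 1) (by omega) (by omega) (by omega)]
      simp [hgle]
    · have hne : (Int.gcd lo hi : Int) ≠ h := by
        intro heq
        exact hdvd ⟨by rw [← heq] at *; exact (PySem.Int.mod_eq_zero_iff_dvd lo _).mpr hgdl,
                    by rw [← heq] at *; exact (PySem.Int.mod_eq_zero_iff_dvd hi _).mpr hgdr⟩
      rw [ih (h - 1) (by omega) (by omega) (by omega)]
      simp [hgle]
    · -- h < 2 forces ¬ 2 ≤ gcd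
      omega
    · rfl

theorem solution_eq_alt (W H : Int) : solution W H = solution_alt W H := by
  unfold solution solution_alt
  set lo := if W ≤ H then W else H with hlo_def
  set hi := if W ≤ H then H else W with hhi_def
  have hle : lo ≤ hi := by rw [hlo_def, hhi_def]; split_ifs with h <;> omega
  have hsum : lo + hi = W + H := by rw [hlo_def, hhi_def]; split_ifs with h <;> ring
  by_cases hbr : W = H ∨ lo = 1
  · simp [hbr]
  · simp only [if_neg hbr]
    by_cases h2 : 2 ≤ lo
    · have hg := findDiv_eq lo hi h2 hle lo.toNat lo (le_refl _)
        (Int.le_of_dvd (by omega) (Int.gcd_dvd_left lo hi)) (le_refl _)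
      have hgpos : 0 < (Int.gcd lo hi : Int) := by
        have : lo ≠ 0 := by omega
        exact_mod_cast Int.gcd_pos_of_ne_zero_left hi this
      have heu : euclid lo hi = (Int.gcd lo hi : Int) :=
        euclid_eq_gcd hi.natAbs lo hi (le_refl _) (by omega) (by omega)
      rw [hg]
      by_cases hgle : 2 ≤ (Int.gcd lo hi : Int)
      · simp only [if_pos hgle, if_pos h2, heu]
      · have hg1 : (Int.gcd lo hi : Int) = 1 := by omega
        rw [if_neg hgle]
        simp only [if_pos h2, heu]
        have f1 : ∀ x : Int, PySem.Int.floordiv x 1 = x := by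
          intro x
          rw [PySem.Int.floordiv_eq_ediv_of_pos (by omega)]
          simp
        rw [hg1, f1, f1]
        omega
    · have hnone : findDiv lo hi lo = none := by rw [findDiv]; simp [h2]
      rw [hnone, if_neg h2]

-- ===== VERDICT (by name: the statement is the Claim_ definition above) =====
theorem solution_spec : Claim_equal_solution := by
  intro W H _
  exact solution_eq_alt W H
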